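-- pv_equiv track=rewrite | github.com/trieschlab/PymoNNto | Exploration/Network_UI/TabBase.py | interpret_recording_variable
-- ===== SOURCE A (Python) =====
-- def interpret_recording_variable(var):
--     chars = '.,()[]+-*/%'
--     found = False
--     for c in chars:
--         if c in var:
--             found = True
--
--     if not found:
--         var = 'n.' + var
--
--     return var
-- ===== SOURCE B (Python) =====
-- def interpret_recording_variable(var):
--     for c in var:
--         if c in '.,()[]+-*/%':
--             return var
--     return 'n.' + var
-- ===== Notes on version B (the rewrite author's own statement) =====
-- stated objective: simpler
-- what changed: Inverts the traversal: instead of A's full loop over the 11 operator strings doing a substring scan of var for each and accumulating a flag, B makes a single early-exit pass over var's characters, returning var at the first operator character and the prefixed string if the pass completes.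
import Mathlib
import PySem

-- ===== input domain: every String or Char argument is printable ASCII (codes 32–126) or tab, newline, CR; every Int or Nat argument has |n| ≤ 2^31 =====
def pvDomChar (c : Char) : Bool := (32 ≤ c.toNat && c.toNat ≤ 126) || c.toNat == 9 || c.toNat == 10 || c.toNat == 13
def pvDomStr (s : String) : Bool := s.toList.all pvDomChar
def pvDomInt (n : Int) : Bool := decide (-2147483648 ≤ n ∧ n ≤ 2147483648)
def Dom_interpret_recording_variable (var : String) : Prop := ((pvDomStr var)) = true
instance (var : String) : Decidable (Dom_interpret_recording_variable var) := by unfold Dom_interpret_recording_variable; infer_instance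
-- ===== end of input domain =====

-- B inverts the traversal: a single early-exit pass over var's characters (return var at the
-- first operator character) instead of A's full loop over the 11 operators, each doing a
-- substring scan of var into an accumulated flag; simpler, same result.

-- ===== PORT A =====
def interpret_recording_variable (var : String) : String :=
  let chars : List Char := ".,()[]+-*/%".toList
  let found := chars.foldl (fun found c =>
    if PySem.Str.isIn (String.ofList [c]) var then true else found) false
  if !found then String.ofList ("n.".toList ++ var.toList) else var

-- ===== PORT B =====
-- early-exit scan over var's characters ('for c in var: if c in chars: return var')
def interpret_recording_variable_altGo (var : String) : List Char → String
  | [] => String.ofList ("n.".toList ++ var.toList)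
  | c :: rest =>
    if PySem.Chars.isIn [c] ".,()[]+-*/%".toList then var
    else interpret_recording_variable_altGo var rest

def interpret_recording_variable_alt (var : String) : String :=
  interpret_recording_variable_altGo var var.toList

-- ===== PRECONDITION & SPEC =====
def Spec_interpret_recording_variable (var : String) (out : String) : Prop := out = interpret_recording_variable_alt var
instance (var : String) (out : String) : Decidable (Spec_interpret_recording_variable var out) := by unfold Spec_interpret_recording_variable; infer_instance

-- ===== CLAIM (what is proved, stated in full; the proofs are below) =====
def Claim_equal_interpret_recording_variable : Prop := ∀ (var : String), Dom_interpret_recording_variable var → Spec_interpret_recording_variable var (interpret_recording_variable var)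

-- ===== LEMMAS AND PROOFS =====

-- a single-character 'in' test is membership
lemma isIn_singleton_iff (c : Char) (l : List Char) :
    PySem.Chars.isIn [c] l = true ↔ c ∈ l := by
  rw [PySem.Chars.isIn_iff_infix]
  constructor
  · intro h; exact h.sublist.subset (by simp)
  · intro h
    obtain ⟨s, t, hst⟩ := List.append_of_mem h
    exact ⟨s, t, by rw [hst]; simp⟩

-- A's fold over the operator characters sets the flag iff some operator char occurs in var.
lemma foldl_flag_eq_any (cs : List Char) (var : String) (b : Bool) :
    cs.foldl (fun found c => if PySem.Str.isIn (String.ofList [c]) var then true else found) b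
      = (b || cs.any fun c => c ∈ var.toList) := by
  induction cs generalizing b with
  | nil => simp
  | cons c cs ih =>
    simp only [List.foldl_cons, List.any_cons, ih]
    by_cases h : c ∈ var.toList
    · simp [h, (isIn_singleton_iff c var.toList).mpr h]
    · have hf : PySem.Chars.isIn [c] var.toList = false :=
        Bool.eq_false_iff.mpr (fun hh => h ((isIn_singleton_iff c var.toList).mp hh))
      simp [h, hf]

-- B's early-exit scan returns var iff it meets an operator character.
lemma altGo_eq (var : String) (l : List Char) :
    interpret_recording_variable_altGo var l =
      (if (l.any fun c => c ∈ ".,()[]+-*/%".toList) then var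
       else String.ofList ("n.".toList ++ var.toList)) := by
  induction l with
  | nil => simp [interpret_recording_variable_altGo]
  | cons c rest ih =>
    rw [show interpret_recording_variable_altGo var (c :: rest)
          = (if PySem.Chars.isIn [c] ".,()[]+-*/%".toList then var
             else interpret_recording_variable_altGo var rest) from rfl,
        ih, List.any_cons]
    generalize ".,()[]+-*/%".toList = L
    by_cases h : c ∈ L
    · simp [h, (isIn_singleton_iff c L).mpr h]
    · have hf : PySem.Chars.isIn [c] L = false :=
        Bool.eq_false_iff.mpr (fun hh => h ((isIn_singleton_iff c L).mp hh))
      simp [h, hf]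

-- the two traversal axes test the same thing: a common element of var and the operator list
lemma any_mem_comm (l1 l2 : List Char) :
    (l1.any fun c => c ∈ l2) = (l2.any fun c => c ∈ l1) := by
  rw [Bool.eq_iff_iff]
  simp only [List.any_eq_true, decide_eq_true_eq]
  tauto

-- ===== VERDICT (by name: the statement is the Claim_ definition above) =====
theorem interpret_recording_variable_spec : Claim_equal_interpret_recording_variable := by
  intro var _
  unfold Spec_interpret_recording_variable interpret_recording_variable interpret_recording_variable_alt
  rw [altGo_eq, any_mem_comm]
  simp only [foldl_flag_eq_any, Bool.false_or]
  by_cases h : (".,()[]+-*/%".toList.any fun c => c ∈ var.toList) = true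
  · rw [if_neg (by rw [h]; simp), if_pos h]
  · have h' := Bool.eq_false_iff.mpr h
    rw [if_pos (by rw [h']; simp), if_neg (by rw [h']; simp)]
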